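-- pv_equiv track=rewrite | github.com/durapensa/ksi | migrate_profiles_to_components.py | should_skip_profile
-- ===== SOURCE A (Python) =====
-- SKIP_PROFILES = {
--     "test_base_agent",
--     "temp_profile_*",  # Temporary profiles
--     "evaluator_judge*",  # Old judge system
--     "analyst_judge*",   # Old judge system
--     "rewriter_judge*",  # Old judge system
-- }
--
-- def should_skip_profile(profile_name: str) -> bool:
--     """Check if profile should be skipped."""
--     for skip_pattern in SKIP_PROFILES:
--         if skip_pattern.endswith('*'):
--             if profile_name.startswith(skip_pattern[:-1]):
--                 return True
--         elif profile_name == skip_pattern: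
--             return True
--     return False
-- ===== SOURCE B (Python) =====
-- SKIP_PROFILES = {
--     "test_base_agent",
--     "temp_profile_*",  # Temporary profiles
--     "evaluator_judge*",  # Old judge system
--     "analyst_judge*",   # Old judge system
--     "rewriter_judge*",  # Old judge system
-- }
--
-- # Build, once at module load, a prefix trie of all patterns.
-- # A node is [star, end, children]: star = a wildcard pattern ends here (any
-- # continuation matches), end = an exact pattern ends here, children = dict char -> node.
-- def _build_trie():
--     root = [False, False, {}]
--     for pattern in SKIP_PROFILES:
--         star = pattern.endswith('*')
--         chars = pattern[:-1] if star else pattern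
--         node = root
--         for c in chars:
--             node = node[2].setdefault(c, [False, False, {}])
--         if star:
--             node[0] = True
--         else:
--             node[1] = True
--     return root
--
-- _TRIE = _build_trie()
--
-- def should_skip_profile(profile_name: str) -> bool:
--     """Check if profile should be skipped."""
--     node = _TRIE
--     for c in profile_name:
--         if node[0]:          # passed a wildcard point: everything below matches
--             return True
--         child = node[2].get(c)
--         if child is None:
--             return False
--         node = child
--     return node[0] or node[1]
-- ===== Notes on version B (the rewrite author's own statement) =====
-- stated objective: alternative
-- what changed: Instead of scanning the pattern set on every call, B compiles all patterns once into a prefix trie (wildcard and exact-end flags on nodes) and answers each query by a single character-by-character walk of the input through the trie.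
import Mathlib
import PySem

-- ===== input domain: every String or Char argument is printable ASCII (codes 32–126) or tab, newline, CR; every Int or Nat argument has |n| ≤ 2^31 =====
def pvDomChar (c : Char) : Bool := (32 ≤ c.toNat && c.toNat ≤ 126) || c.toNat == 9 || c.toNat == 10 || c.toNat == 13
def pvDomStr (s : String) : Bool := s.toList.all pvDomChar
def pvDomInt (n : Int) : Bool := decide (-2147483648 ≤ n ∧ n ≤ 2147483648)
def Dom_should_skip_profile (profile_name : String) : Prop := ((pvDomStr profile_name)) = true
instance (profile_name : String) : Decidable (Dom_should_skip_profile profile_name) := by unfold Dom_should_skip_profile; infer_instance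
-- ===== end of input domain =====

-- B replaces A's per-call scan of the pattern set by a prefix trie built once, walked char-by-char (objective: alternative).

-- ===== PORT A =====
def pvSkipProfiles : List String :=
  ["test_base_agent", "temp_profile_*", "evaluator_judge*", "analyst_judge*", "rewriter_judge*"]

def pvSkipLoop (profile_name : String) : List String → Bool
  | [] => false
  | skip_pattern :: rest =>
    if PySem.Str.endswith skip_pattern "*" then
      if PySem.Str.startswith profile_name (PySem.Str.slice skip_pattern none (some (-1))) then true
      else pvSkipLoop profile_name rest
    else if profile_name == skip_pattern then true
    else pvSkipLoop profile_name rest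

def should_skip_profile (profile_name : String) : Bool :=
  pvSkipLoop profile_name pvSkipProfiles

-- ===== PORT B =====
-- trie node: star flag (wildcard pattern ends here), end flag (exact pattern ends here), children
mutual
inductive PvTrie where
  | node : Bool → Bool → PvChildren → PvTrie
inductive PvChildren where
  | nil : PvChildren
  | cons : Char → PvTrie → PvChildren → PvChildren
end

-- insert a pattern's character list (star already stripped) into the trie
mutual
def pvInsertT (t : PvTrie) (cs : List Char) (star : Bool) : PvTrie :=
  match t, cs with
  | .node s e ch, [] => if star then .node true e ch else .node s true ch
  | .node s e ch, c :: cs' => .node s e (pvInsertC ch c cs' star)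
termination_by (cs.length, 1, 0)
def pvInsertC (ch : PvChildren) (c : Char) (cs : List Char) (star : Bool) : PvChildren :=
  match ch with
  | .nil => .cons c (pvInsertT (.node false false .nil) cs star) .nil
  | .cons c' t rest =>
      if c' = c then .cons c' (pvInsertT t cs star) rest
      else .cons c' t (pvInsertC rest c cs star)
termination_by (cs.length + 1, 0, sizeOf ch)
end

def pvFindC : PvChildren → Char → Option PvTrie
  | .nil, _ => none
  | .cons c' t rest, c => if c' = c then some t else pvFindC rest c

-- the walk of should_skip_profile's loop
def pvWalk : PvTrie → List Char → Bool
  | .node s e _, [] => s || e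
  | .node s _ ch, c :: cs =>
      if s then true
      else match pvFindC ch c with
        | none => false
        | some t => pvWalk t cs

def pvTrie : PvTrie :=
  pvSkipProfiles.foldl
    (fun t pattern =>
      let star := PySem.Str.endswith pattern "*"
      let chars := if star then (PySem.Str.slice pattern none (some (-1))).toList else pattern.toList
      pvInsertT t chars star)
    (.node false false .nil)

def should_skip_profile_alt (profile_name : String) : Bool :=
  pvWalk pvTrie profile_name.toList

-- ===== PRECONDITION & SPEC =====
def Spec_should_skip_profile (profile_name : String) (out : Bool) : Prop := out = should_skip_profile_alt profile_name
instance (profile_name : String) (out : Bool) : Decidable (Spec_should_skip_profile profile_name out) := by unfold Spec_should_skip_profile; infer_instance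

-- ===== CLAIM =====
def Claim_equal_should_skip_profile : Prop := ∀ (profile_name : String), Dom_should_skip_profile profile_name → Spec_should_skip_profile profile_name (should_skip_profile profile_name)

-- ===== LEMMAS AND PROOFS =====

-- walking the empty trie never matches
theorem pvWalk_empty (input : List Char) : pvWalk (.node false false .nil) input = false := by
  cases input <;> simp [pvWalk, pvFindC]

-- how insertion shows up in child lookup
theorem pvFindC_insertC (ch : PvChildren) (c : Char) (cs : List Char) (star : Bool) (d : Char) :
    pvFindC (pvInsertC ch c cs star) d =
      if d = c then some (pvInsertT ((pvFindC ch c).getD (.node false false .nil)) cs star)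
      else pvFindC ch d :=
  match ch with
  | .nil => by
    simp only [pvInsertC, pvFindC]
    by_cases hdc : d = c
    · subst hdc; simp
    · rw [if_neg (show ¬ c = d from fun h => hdc h.symm), if_neg hdc]
  | .cons c' t rest => by
    simp only [pvInsertC]
    by_cases hc : c' = c
    · subst hc
      by_cases hd : d = c'
      · subst hd; simp [pvFindC]
      · simp [pvFindC, hd, show ¬ c' = d from fun h => hd h.symm]
    · by_cases hd : c' = d
      · subst hd
        simp [pvFindC, hc]
      · simp [pvFindC, if_neg hc, hd, pvFindC_insertC rest c cs star d]

-- main invariant: walking after one insertion = old walk OR this pattern matches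
theorem pvWalk_insertT (cs : List Char) (t : PvTrie) (input : List Char) (star : Bool) :
    pvWalk (pvInsertT t cs star) input =
      (pvWalk t input || if star then decide (cs <+: input) else decide (cs = input)) := by
  induction cs generalizing t input with
  | nil =>
    obtain ⟨s, e, ch⟩ := t
    cases star <;> cases input <;>
      simp [pvInsertT, pvWalk, List.nil_prefix]
  | cons c cs ih =>
    obtain ⟨s, e, ch⟩ := t
    cases input with
    | nil =>
      cases star <;> simp [pvInsertT, pvWalk]
    | cons d ds =>
      simp only [pvInsertT, pvWalk, pvFindC_insertC]
      by_cases hs : s = true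
      · subst hs; simp
      · simp only [Bool.not_eq_true] at hs; subst hs
        simp only [if_false, Bool.false_eq_true]
        by_cases hdc : d = c
        · subst hdc
          cases hfind : pvFindC ch d with
          | none =>
            simp only [Option.getD, reduceIte, ih, pvWalk_empty, Bool.false_or]
            cases star <;> simp [List.cons_prefix_cons]
          | some t' =>
            simp only [Option.getD, reduceIte, ih]
            cases star <;> simp [List.cons_prefix_cons]
        · simp only [if_neg hdc]
          have hpre : ¬ (c :: cs <+: d :: ds) := by
            simp [List.cons_prefix_cons]; intro h; exact absurd h.symm hdc
          have heq : ¬ (c :: cs = d :: ds) := by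
            intro h; injection h with h1 _; exact hdc h1.symm
          cases hfind : pvFindC ch d <;> cases star <;>
            simp [hpre, heq]

-- ===== VERDICT =====
set_option maxHeartbeats 1000000 in
theorem should_skip_profile_spec : Claim_equal_should_skip_profile := by
  intro s _
  unfold Spec_should_skip_profile should_skip_profile should_skip_profile_alt pvTrie
  -- evaluate B's trie build on the literal pattern list, then both sides become
  -- the same disjunction of prefix/equality tests
  simp only [pvSkipProfiles, List.foldl, pvWalk_insertT, pvWalk_empty, pvSkipLoop]
  simp [PySem.Str.endswith, PySem.Str.slice, PySem.Chars.endswith,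
        PySem.List.slice, PySem.List.clampIdx,
        PySem.Str.startswith, PySem.Chars.startswith_iff,
        String.ext_iff]
  have h1 : ¬ (['*'] <:+ ['t','e','s','t','_','b','a','s','e','_','a','g','e','n','t']) := by decide
  have h2 : (['*'] <:+ ['t','e','m','p','_','p','r','o','f','i','l','e','_','*']) := by decide
  have h3 : (['*'] <:+ ['e','v','a','l','u','a','t','o','r','_','j','u','d','g','e','*']) := by decide
  have h4 : (['*'] <:+ ['a','n','a','l','y','s','t','_','j','u','d','g','e','*']) := by decide
  have h5 : (['*'] <:+ ['r','e','w','r','i','t','e','r','_','j','u','d','g','e','*']) := by decide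
  simp only [if_neg h1, if_pos h2, if_pos h3, if_pos h4, if_pos h5]
  simp [Bool.or_assoc, eq_comm]
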